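-- pv_equiv track=rewrite | github.com/Fondamenti18/fondamenti-di-programmazione | students/1810997/homework04/program01.py | dt
-- ===== SOURCE A (Python) =====
-- def dt(x,d):# x indice da cercare, d dizionario da usare nella ricerca
--     if x in d:
--
--         figli=d.pop(x,'[]')
--         if figli!='[]':
--             for figlio in figli:
--                 d=dt(figlio,d)
--             return d
--         else:
--             return d
--     else:
--         return d
-- ===== SOURCE B (Python) =====
-- def dt(x, d):
--     # Iterative DFS with an explicit stack instead of recursion; mutates d like A.
--     stack = [x]
--     while stack:
--         node = stack.pop()
--         if node in d:
--             stack.extend(reversed(d.pop(node)))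
--     return d
-- ===== Notes on version B (the rewrite author's own statement) =====
-- stated objective: idiomatic
-- what changed: Replaces the recursion over children (and the unreachable '[]' string sentinel) with the standard iterative DFS using an explicit worklist stack, pushing children reversed so nodes are removed in the same preorder.
import Mathlib
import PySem

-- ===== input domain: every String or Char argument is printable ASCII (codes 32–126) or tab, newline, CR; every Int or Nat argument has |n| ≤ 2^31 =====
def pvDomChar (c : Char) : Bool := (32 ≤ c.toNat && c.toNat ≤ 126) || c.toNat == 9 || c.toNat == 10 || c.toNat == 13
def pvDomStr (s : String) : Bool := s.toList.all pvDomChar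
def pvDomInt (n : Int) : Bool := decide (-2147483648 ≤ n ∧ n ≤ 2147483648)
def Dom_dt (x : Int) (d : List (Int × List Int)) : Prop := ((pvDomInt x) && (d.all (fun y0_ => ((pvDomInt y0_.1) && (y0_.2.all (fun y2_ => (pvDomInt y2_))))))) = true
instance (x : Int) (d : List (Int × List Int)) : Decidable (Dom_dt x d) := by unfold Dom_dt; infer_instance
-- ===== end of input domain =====

-- B replaces A's recursive subtree deletion (with its unreachable '[]' string sentinel) by the
-- standard iterative DFS with an explicit worklist stack; same return value, and both mutate the
-- caller's dict in the same way (the equivalence proved here is about the returned dict).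


-- ===== PORT A =====
-- termination helper for both ports: popping a present key strictly shrinks the dict
theorem pvPopLen {x : Int} {figli : List Int} {d d' : PySem.Dict Int (List Int)}
    (h : d.pop? x = some (figli, d')) : d'.items.length < d.items.length := by
  simp only [PySem.Dict.pop?, PySem.Dict.get?, Option.map_eq_some_iff] at h
  obtain ⟨v, ⟨p, hp, hv⟩, heq⟩ := h
  obtain ⟨h1, h2⟩ := Prod.mk.injEq .. ▸ heq
  subst h2
  simp only [PySem.Dict.erase]
  refine List.length_filter_lt_length_iff_exists.mpr ?_
  exact ⟨p, List.mem_of_find?_eq_some hp, by simpa using List.find?_some hp⟩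

mutual
-- dtA x d: Python A's body. 'if x in d: figli = d.pop(x,'[]')' is the some-branch of pop?
-- (the '[]' default is unreachable under the membership guard); 'if figli != '[]'' always
-- holds there (a list never equals that string), and when figli = [] its for-loop runs zero
-- times, so both of A's inner branches are the dtLA fold. The subtype only carries the
-- length bound needed for termination; the computed value is A's.
def dtA (x : Int) (d : PySem.Dict Int (List Int)) :
    {r : PySem.Dict Int (List Int) // r.items.length ≤ d.items.length} :=
  match h : d.pop? x with
  | some (figli, d') =>
      let r := dtLA figli d'
      ⟨r.1, le_trans r.2 (le_of_lt (pvPopLen h))⟩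
  | none => ⟨d, le_refl _⟩
termination_by (d.items.length, 0)
decreasing_by
  exact Prod.Lex.left _ _ (pvPopLen h)
-- 'for figlio in figli: d = dt(figlio, d)'
def dtLA (cs : List Int) (d : PySem.Dict Int (List Int)) :
    {r : PySem.Dict Int (List Int) // r.items.length ≤ d.items.length} :=
  match cs with
  | [] => ⟨d, le_refl _⟩
  | c :: cs' =>
      let r1 := dtA c d
      let r2 := dtLA cs' r1.1
      ⟨r2.1, le_trans r2.2 r1.2⟩
termination_by (d.items.length, cs.length + 1)
decreasing_by
  · exact Prod.Lex.right _ (by simp)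
  · rcases lt_or_eq_of_le r1.2 with hlt | heq
    · exact Prod.Lex.left _ _ hlt
    · rw [heq]; exact Prod.Lex.right _ (by simp)
end

def dt (x : Int) (d : List (Int × List Int)) : List (Int × List Int) :=
  (dtA x (PySem.Dict.mk d)).1.items

-- ===== PORT B =====
-- The Python stack has its top at the END; the port keeps the stack reversed (top at the HEAD),
-- so 'stack.pop()' is the head and 'stack.extend(reversed(figli))' prepends figli in order.
def dtLoop (stack : List Int) (d : PySem.Dict Int (List Int)) : PySem.Dict Int (List Int) :=
  match stack with
  | [] => d
  | n :: rest =>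
    match h : d.pop? n with          -- 'if node in d: figli = d.pop(node)'
    | some (figli, d') => dtLoop (figli ++ rest) d'
    | none => dtLoop rest d
termination_by (d.items.length, stack.length)
decreasing_by
  · exact Prod.Lex.left _ _ (pvPopLen h)
  · exact Prod.Lex.right _ (by simp)

def dt_alt (x : Int) (d : List (Int × List Int)) : List (Int × List Int) :=
  (dtLoop [x] (PySem.Dict.mk d)).items

-- ===== PRECONDITION & SPEC =====
def Spec_dt (x : Int) (d : List (Int × List Int)) (out : List (Int × List Int)) : Prop := out = dt_alt x d
instance (x : Int) (d : List (Int × List Int)) (out : List (Int × List Int)) : Decidable (Spec_dt x d out) := by unfold Spec_dt; infer_instance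

-- ===== CLAIM (what is proved, stated in full; the proofs are below) =====
def Claim_equal_dt : Prop := ∀ (x : Int) (d : List (Int × List Int)), Dom_dt x d → Spec_dt x d (dt x d)

-- ===== LEMMAS AND PROOFS =====
-- unfolding equations for the well-founded definitions
theorem dtA_some {x : Int} {figli : List Int} {d d' : PySem.Dict Int (List Int)}
    (h : d.pop? x = some (figli, d')) : (dtA x d).1 = (dtLA figli d').1 := by
  rw [dtA.eq_def]
  split <;> simp_all
  rename_i hh
  rw [h.2]

theorem dtA_none {x : Int} {d : PySem.Dict Int (List Int)}
    (h : d.pop? x = none) : (dtA x d).1 = d := by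
  rw [dtA.eq_def]
  split <;> simp_all

theorem dtLA_nil {d : PySem.Dict Int (List Int)} : (dtLA [] d).1 = d := by
  rw [dtLA.eq_def]

theorem dtLA_cons {c : Int} {cs : List Int} {d : PySem.Dict Int (List Int)} :
    (dtLA (c :: cs) d).1 = (dtLA cs (dtA c d).1).1 := by
  rw [dtLA.eq_def]

theorem dtLoop_nil {d : PySem.Dict Int (List Int)} : dtLoop [] d = d := by
  rw [dtLoop.eq_def]

theorem dtLoop_cons_some {n : Int} {rest figli : List Int} {d d' : PySem.Dict Int (List Int)}
    (h : d.pop? n = some (figli, d')) : dtLoop (n :: rest) d = dtLoop (figli ++ rest) d' := by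
  rw [dtLoop.eq_def]
  split <;> simp_all
  split <;> simp_all

theorem dtLoop_cons_none {n : Int} {rest : List Int} {d : PySem.Dict Int (List Int)}
    (h : d.pop? n = none) : dtLoop (n :: rest) d = dtLoop rest d := by
  rw [dtLoop.eq_def]
  split <;> simp_all
  split <;> simp_all

-- an empty dict pops nothing
theorem pvPop_none_of_nil {d : PySem.Dict Int (List Int)} (h : d.items.length = 0) (x : Int) :
    d.pop? x = none := by
  cases d with
  | mk items =>
    cases items with
    | nil => rfl
    | cons a l => simp at h

-- core simulation: popping the top of the stack equals one recursive call of A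
theorem pvKey : ∀ (n : ℕ) (d : PySem.Dict Int (List Int)), d.items.length ≤ n →
    ∀ (x : Int) (s : List Int), dtLoop (x :: s) d = dtLoop s (dtA x d).1 := by
  intro n
  induction n with
  | zero =>
    intro d hd x s
    have h := pvPop_none_of_nil (Nat.le_zero.mp hd) x
    rw [dtLoop_cons_none h, dtA_none h]
  | succ n ih =>
    intro d hd x s
    cases h : d.pop? x with
    | none => rw [dtLoop_cons_none h, dtA_none h]
    | some v =>
      obtain ⟨figli, d'⟩ := v
      have hd' : d'.items.length ≤ n := by
        have := pvPopLen h; omega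
      have aux : ∀ (cs : List Int) (d₀ : PySem.Dict Int (List Int)), d₀.items.length ≤ n →
          ∀ s, dtLoop (cs ++ s) d₀ = dtLoop s (dtLA cs d₀).1 := by
        intro cs
        induction cs with
        | nil => intro d₀ _ s; rw [List.nil_append, dtLA_nil]
        | cons c cs' ihc =>
          intro d₀ h₀ s
          have step : dtLoop ((c :: cs') ++ s) d₀ = dtLoop (cs' ++ s) (dtA c d₀).1 :=
            ih d₀ h₀ c (cs' ++ s)
          rw [step, ihc (dtA c d₀).1 (le_trans (dtA c d₀).2 h₀) s, dtLA_cons]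
      rw [dtLoop_cons_some h, dtA_some h]
      exact aux figli d' hd' s

-- ===== VERDICT (by name: the statement is the Claim_ definition above) =====
theorem dt_spec : Claim_equal_dt := by
  intro x d _
  unfold Spec_dt dt dt_alt
  rw [pvKey (PySem.Dict.mk d).items.length _ (le_refl _) x [], dtLoop_nil]
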